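-- pv_equiv track=rewrite | github.com/zyishai/zipper-home-exercise-solution | limit-similarities.py | limit_consecutive_characters_2
-- ===== SOURCE A (Python) =====
-- def limit_consecutive_characters_2(input_str, max_consec_chars):
--   if type(input_str) != str:
--     return input_str
--
--   result = ''
--   last_consecutive_character = None
--   consecutive_characters_counter = 0
--
--   for char in input_str: # O(n)
--     if char != last_consecutive_character:
--       result += char
--       last_consecutive_character = char
--       consecutive_characters_counter = 1
--     elif char == last_consecutive_character and consecutive_characters_counter < max_consec_chars:
--       result += char
--       consecutive_characters_counter += 1
--
--   return result
-- ===== SOURCE B (Python) =====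
-- def limit_consecutive_characters_2(input_str, max_consec_chars):
--   if type(input_str) != str:
--     return input_str
--   cap = max(max_consec_chars, 1)  # A always keeps the first char of a run
--   pieces = []
--   i, n = 0, len(input_str)
--   while i < n:
--     j = i
--     while j < n and input_str[j] == input_str[i]:
--       j += 1
--     pieces.append(input_str[i] * min(j - i, cap))
--     i = j
--   return ''.join(pieces)
-- ===== Notes on version B (the rewrite author's own statement) =====
-- stated objective: simpler
-- what changed: B scans the string run by run with two indices (maximal blocks of equal characters), emits char*min(run_length, max(max_consec_chars,1)) per run and joins once, instead of A's char-by-char state machine with last-character and counter state and incremental string concatenation.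
import Mathlib
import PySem

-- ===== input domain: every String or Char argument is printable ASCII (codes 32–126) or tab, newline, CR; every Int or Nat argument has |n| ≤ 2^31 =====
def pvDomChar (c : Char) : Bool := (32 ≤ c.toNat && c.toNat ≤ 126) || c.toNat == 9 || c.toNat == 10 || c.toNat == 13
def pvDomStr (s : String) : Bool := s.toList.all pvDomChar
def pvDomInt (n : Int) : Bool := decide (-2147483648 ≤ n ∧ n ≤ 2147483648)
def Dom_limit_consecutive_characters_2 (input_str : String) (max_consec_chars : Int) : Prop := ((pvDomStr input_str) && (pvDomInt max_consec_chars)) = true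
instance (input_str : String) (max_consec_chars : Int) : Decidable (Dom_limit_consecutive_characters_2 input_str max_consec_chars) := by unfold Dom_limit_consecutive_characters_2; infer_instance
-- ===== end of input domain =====

-- B replaces A's char-by-char state machine (last char + counter, string +=) by a
-- run-by-run scan emitting min(run length, max(cap,1)) copies of each run's character (objective: simpler).


-- ===== PORT A =====
-- the for-loop of A: state = (result, last_consecutive_character, consecutive_characters_counter)
def pvLoopA (l : List Char) (res : List Char) (last : Option Char) (cnt : Int)
    (maxc : Int) : List Char :=
  match l with
  | [] => res
  | ch :: rest =>
    if last ≠ some ch then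
      pvLoopA rest (res ++ [ch]) (some ch) 1 maxc
    else if cnt < maxc then
      pvLoopA rest (res ++ [ch]) (some ch) (cnt + 1) maxc
    else
      pvLoopA rest res last cnt maxc

def limit_consecutive_characters_2 (input_str : String) (max_consec_chars : Int) : String :=
  String.ofList (pvLoopA input_str.toList [] none 0 max_consec_chars)

-- ===== PORT B =====
-- B's outer while loop over runs; the inner index scan 'while input_str[j] == input_str[i]'
-- is the takeWhile/dropWhile split of the leading maximal run.
def pvRunsB (l : List Char) (cap : Int) : List Char :=
  match l with
  | [] => []
  | c :: rest =>
    let runLen : Nat := (rest.takeWhile (· = c)).length + 1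
    List.replicate (min (runLen : Int) cap).toNat c ++ pvRunsB (rest.dropWhile (· = c)) cap
termination_by l.length
decreasing_by
  simp only [List.length_cons]
  exact Nat.lt_succ_of_le (List.length_dropWhile_le _ _)

def limit_consecutive_characters_2_alt (input_str : String) (max_consec_chars : Int) : String :=
  String.ofList (pvRunsB input_str.toList (max max_consec_chars 1))

-- ===== PRECONDITION & SPEC =====
def Spec_limit_consecutive_characters_2 (input_str : String) (max_consec_chars : Int) (out : String) : Prop := out = limit_consecutive_characters_2_alt input_str max_consec_chars
instance (input_str : String) (max_consec_chars : Int) (out : String) : Decidable (Spec_limit_consecutive_characters_2 input_str max_consec_chars out) := by unfold Spec_limit_consecutive_characters_2; infer_instance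

-- ===== CLAIM (what is proved, stated in full; the proofs are below) =====
def Claim_equal_limit_consecutive_characters_2 : Prop := ∀ (input_str : String) (max_consec_chars : Int), Dom_limit_consecutive_characters_2 input_str max_consec_chars → Spec_limit_consecutive_characters_2 input_str max_consec_chars (limit_consecutive_characters_2 input_str max_consec_chars)

-- ===== LEMMAS AND PROOFS =====

-- once the remaining input does not start with c, a stale (some c, cnt) state behaves like the fresh state
theorem pvLoopA_reset (l : List Char) (res : List Char) (c : Char) (cnt maxc : Int)
    (h : l.head? ≠ some c) :
    pvLoopA l res (some c) cnt maxc = pvLoopA l res none 0 maxc := by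
  cases l with
  | nil => rfl
  | cons x xs =>
    have hx : c ≠ x := by
      intro hcx; exact h (by simp [hcx])
    simp [pvLoopA, hx, ]

-- processing a block of k further copies of c from state (some c, j)
theorem pvLoopA_run (k : Nat) (rest : List Char) (res : List Char) (c : Char)
    (j maxc : Int) (h : rest.head? ≠ some c) :
    pvLoopA (List.replicate k c ++ rest) res (some c) j maxc
      = pvLoopA rest (res ++ List.replicate (min k (maxc - j).toNat) c) none 0 maxc := by
  induction k generalizing res j with
  | zero => simp [pvLoopA_reset rest res c j maxc h]
  | succ k ih =>
    by_cases hj : j < maxc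
    · have : pvLoopA (List.replicate (k+1) c ++ rest) res (some c) j maxc
          = pvLoopA (List.replicate k c ++ rest) (res ++ [c]) (some c) (j + 1) maxc := by
        simp [List.replicate_succ, pvLoopA, hj]
      rw [this, ih _ _]
      have hnat : min (k + 1) (maxc - j).toNat = min k (maxc - (j + 1)).toNat + 1 := by
        omega
      rw [hnat, List.replicate_succ, List.append_assoc]
      rfl
    · have : pvLoopA (List.replicate (k+1) c ++ rest) res (some c) j maxc
          = pvLoopA (List.replicate k c ++ rest) res (some c) j maxc := by
        simp [List.replicate_succ, pvLoopA, hj]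
      rw [this, ih _ _]
      have hnat : min k (maxc - j).toNat = min (k + 1) (maxc - j).toNat := by omega
      rw [hnat]

theorem pvLoopA_eq_runsB_aux (n : Nat) : ∀ (l : List Char), l.length ≤ n → ∀ (res : List Char) (maxc : Int),
    pvLoopA l res none 0 maxc = res ++ pvRunsB l (max maxc 1) := by
  induction n with
  | zero =>
    intro l hl res maxc
    have : l = [] := List.length_eq_zero_iff.mp (Nat.le_zero.mp hl)
    subst this; simp [pvLoopA, pvRunsB]
  | succ n ih =>
    intro l hl res maxc
    cases l with
    | nil => simp [pvLoopA, pvRunsB]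
    | cons c rest =>
      have hsplit : rest = rest.takeWhile (· = c) ++ rest.dropWhile (· = c) :=
        (List.takeWhile_append_dropWhile (p := (· = c)) (l := rest)).symm
      have hrun : rest.takeWhile (· = c) = List.replicate (rest.takeWhile (· = c)).length c := by
        apply List.eq_replicate_of_mem
        intro b hb
        have := List.mem_takeWhile_imp hb
        simpa using this
      have hhead : (rest.dropWhile (· = c)).head? ≠ some c := by
        intro hcon
        have := List.head?_dropWhile_not (p := (· = c)) (l := rest)
        rw [hcon] at this
        simp at this
      have hstep : pvLoopA (c :: rest) res none 0 maxc
          = pvLoopA rest (res ++ [c]) (some c) 1 maxc := by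
        simp [pvLoopA]
      rw [hstep]
      conv_lhs => rw [hsplit, hrun]
      rw [pvLoopA_run _ _ _ _ _ _ hhead]
      rw [ih _ (by
        have := List.length_dropWhile_le (· = c) rest
        simp only [List.length_cons] at hl
        omega)]
      show res ++ [c] ++ _ ++ _ = res ++ pvRunsB (c :: rest) (max maxc 1)
      have hnat : ((min (((rest.takeWhile (· = c)).length + 1 : Nat) : Int) (max maxc 1)).toNat)
          = min (rest.takeWhile (· = c)).length (maxc - 1).toNat + 1 := by
        omega
      simp only [pvRunsB, hnat, List.replicate_succ]
      simp

theorem pvLoopA_eq_runsB (l : List Char) (res : List Char) (maxc : Int) :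
    pvLoopA l res none 0 maxc = res ++ pvRunsB l (max maxc 1) :=
  pvLoopA_eq_runsB_aux l.length l le_rfl res maxc

-- ===== VERDICT (by name: the statement is the Claim_ definition above) =====
theorem limit_consecutive_characters_2_spec : Claim_equal_limit_consecutive_characters_2 := by
  intro input_str maxc _
  show limit_consecutive_characters_2 input_str maxc = limit_consecutive_characters_2_alt input_str maxc
  unfold limit_consecutive_characters_2 limit_consecutive_characters_2_alt
  rw [pvLoopA_eq_runsB]
  simp
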